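-- pv_equiv track=rewrite | github.com/gbw7942/ADHD_Diagnosis | file.py | valid_array
-- ===== SOURCE A (Python) =====
-- def valid_array(arr):
--     # Check if a_i (i>=3) is the difference between two previous numbers
--     for i in range(2, len(arr)):
--         valid = False
--         for j in range(i):
--             for k in range(j+1, i):
--                 if abs(arr[j] - arr[k]) == arr[i]:
--                     valid = True
--                     break
--             if valid:
--                 break
--         if not valid:
--             return False
--     return True
-- ===== SOURCE B (Python) =====
-- def valid_array(arr):
--     # Maintain the set of absolute differences of all earlier pairs incrementally.
--     diffs = set()
--     for i in range(2, len(arr)):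
--         x = arr[i - 1]
--         for j in range(i - 1):
--             diffs.add(abs(x - arr[j]))
--         if arr[i] not in diffs:
--             return False
--     return True
-- ===== Notes on version B (the rewrite author's own statement) =====
-- stated objective: alternative
-- what changed: Instead of rescanning all earlier pairs (j,k) for every index i, B incrementally maintains a set of the pairwise absolute differences of the elements seen so far and does a single membership test per index (worst-case O(n^2) vs A's O(n^3); intended as faster, but a timing run's inputs exit early and measured only 1.2x, so no speed is claimed).
import Mathlib
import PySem

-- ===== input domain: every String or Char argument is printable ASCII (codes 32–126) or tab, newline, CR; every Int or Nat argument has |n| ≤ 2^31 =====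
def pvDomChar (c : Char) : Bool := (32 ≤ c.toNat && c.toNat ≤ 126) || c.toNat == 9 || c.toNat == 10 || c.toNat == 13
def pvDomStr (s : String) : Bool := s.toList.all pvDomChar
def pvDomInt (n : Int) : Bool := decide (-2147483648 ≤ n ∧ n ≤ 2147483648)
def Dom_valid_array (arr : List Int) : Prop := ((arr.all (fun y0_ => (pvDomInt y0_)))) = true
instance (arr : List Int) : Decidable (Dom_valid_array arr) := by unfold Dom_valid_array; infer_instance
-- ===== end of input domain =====

-- B replaces A's per-index rescan of all earlier pairs by an incrementally maintained set of
-- pairwise absolute differences with one membership test per index (objective: alternative).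

-- ===== PORT A =====
-- A's inner double loop over j, k with the `valid` flag (the `break`s only stop early once
-- `valid` is true; the flag is never reset, so the fold computes the same flag).
def validA_check (arr : List Int) (i : Int) : Bool :=
  (PySem.List.pyRange 0 i 1).foldl (fun valid j =>
    (PySem.List.pyRange (j + 1) i 1).foldl (fun v k =>
      if |PySem.List.pyGetD arr j 0 - PySem.List.pyGetD arr k 0| == PySem.List.pyGetD arr i 0
      then true else v) valid) false

-- A's outer loop with its early `return False`.  Indices produced by range(len(arr)) are
-- always in range, so `pyGetD _ _ 0` (default never used) is exact here.
def validA_outer (arr : List Int) : List Int → Bool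
  | [] => true
  | i :: rest => if !(validA_check arr i) then false else validA_outer arr rest

def valid_array (arr : List Int) : Bool :=
  validA_outer arr (PySem.List.pyRange 2 (PySem.List.len arr) 1)

-- ===== PORT B =====
-- B's loop: `diffs` is the Python set, extended with |arr[i-1] - arr[j]| for j < i-1,
-- then membership of arr[i] is tested; early `return False` as in Source B.
def validB_loop (arr : List Int) : PySem.Set Int → List Int → Bool
  | _, [] => true
  | diffs, i :: rest =>
    let x := PySem.List.pyGetD arr (i - 1) 0
    let diffs' := (PySem.List.pyRange 0 (i - 1) 1).foldl
        (fun s j => PySem.Set.add s |x - PySem.List.pyGetD arr j 0|) diffs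
    if !(PySem.Set.contains diffs' (PySem.List.pyGetD arr i 0)) then false
    else validB_loop arr diffs' rest

def valid_array_alt (arr : List Int) : Bool :=
  validB_loop arr PySem.Set.empty (PySem.List.pyRange 2 (PySem.List.len arr) 1)

-- ===== PRECONDITION & SPEC =====
def Spec_valid_array (arr : List Int) (out : Bool) : Prop := out = valid_array_alt arr
instance (arr : List Int) (out : Bool) : Decidable (Spec_valid_array arr out) := by unfold Spec_valid_array; infer_instance

-- ===== CLAIM (what is proved, stated in full; the proofs are below) =====
def Claim_equal_valid_array : Prop := ∀ (arr : List Int), Dom_valid_array arr → Spec_valid_array arr (valid_array arr)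

-- ===== LEMMAS AND PROOFS =====

-- membership in a fold of Set.add
lemma mem_foldl_add {α : Type} [BEq α] [LawfulBEq α] (f : Int → α) (v : α) :
    ∀ (l : List Int) (s : PySem.Set α),
      (v ∈ l.foldl (fun s j => PySem.Set.add s (f j)) s) ↔ v ∈ s ∨ ∃ j ∈ l, f j = v := by
  intro l
  induction l with
  | nil => simp
  | cons a t ih =>
    intro s
    simp only [List.foldl_cons, ih, PySem.Set.mem_add, List.mem_cons]
    constructor
    · rintro (⟨h | h⟩ | ⟨j, hj, hf⟩)
      · exact Or.inl h
      · exact Or.inr ⟨a, Or.inl rfl, h.symm⟩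
      · exact Or.inr ⟨j, Or.inr hj, hf⟩
    · rintro (h | ⟨j, (rfl | hj), hf⟩)
      · exact Or.inl (Or.inl h)
      · exact Or.inl (Or.inr hf.symm)
      · exact Or.inr ⟨j, hj, hf⟩

lemma foldl_or (p : Int → Bool) : ∀ (l : List Int) (b : Bool),
    l.foldl (fun acc x => acc || p x) b = (b || l.any p) := by
  intro l
  induction l with
  | nil => simp
  | cons a t ih => intro b; simp [ih, Bool.or_assoc]

-- characterisation of A's inner double loop
lemma check_iff (arr : List Int) (i : Int) :
    validA_check arr i = true ↔
      ∃ p q : Int, 0 ≤ p ∧ p < q ∧ q < i ∧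
        |PySem.List.pyGetD arr p 0 - PySem.List.pyGetD arr q 0| = PySem.List.pyGetD arr i 0 := by
  unfold validA_check
  rw [PySem.List.foldl_congr_mem _ _ (fun valid j => valid ||
        (PySem.List.pyRange (j + 1) i 1).any (fun k =>
          |PySem.List.pyGetD arr j 0 - PySem.List.pyGetD arr k 0| == PySem.List.pyGetD arr i 0)) _
      (by intro acc x _; exact PySem.List.foldl_if_true_eq _ _ _)]
  rw [foldl_or]
  simp only [Bool.false_or, List.any_eq_true, PySem.List.mem_pyRange_one, beq_iff_eq]
  constructor
  · rintro ⟨j, ⟨hj0, hji⟩, k, ⟨hjk, hki⟩, h⟩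
    exact ⟨j, k, hj0, by omega, hki, h⟩
  · rintro ⟨p, q, h0, hpq, hqi, h⟩
    exact ⟨p, ⟨h0, by omega⟩, q, ⟨by omega, hqi⟩, h⟩

-- the invariant carried by B's set
def DiffInv (arr : List Int) (diffs : PySem.Set Int) (i : Int) : Prop :=
  ∀ v, v ∈ diffs ↔ ∃ p q : Int, 0 ≤ p ∧ p < q ∧ q < i - 1 ∧
    |PySem.List.pyGetD arr p 0 - PySem.List.pyGetD arr q 0| = v

-- extending the set with the differences of arr[i-1] against arr[0..i-2]
lemma inv_step (arr : List Int) (diffs : PySem.Set Int) (i : Int) (hInv : DiffInv arr diffs i) :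
    DiffInv arr ((PySem.List.pyRange 0 (i - 1) 1).foldl
        (fun s j => PySem.Set.add s |PySem.List.pyGetD arr (i - 1) 0 - PySem.List.pyGetD arr j 0|) diffs)
      (i + 1) := by
  intro v
  rw [mem_foldl_add]
  simp only [PySem.List.mem_pyRange_one]
  constructor
  · rintro (h | ⟨j, ⟨hj0, hji⟩, hf⟩)
    · obtain ⟨p, q, h0, hpq, hqi, h⟩ := (hInv v).1 h
      exact ⟨p, q, h0, hpq, by omega, h⟩
    · exact ⟨j, i - 1, hj0, hji, by omega, by rw [abs_sub_comm]; exact hf⟩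
  · rintro ⟨p, q, h0, hpq, hqi, h⟩
    by_cases hq : q < i - 1
    · exact Or.inl ((hInv v).2 ⟨p, q, h0, hpq, hq, h⟩)
    · have : q = i - 1 := by omega
      subst this
      exact Or.inr ⟨p, ⟨h0, hpq⟩, by rw [abs_sub_comm]; exact h⟩

-- the two loops agree while the invariant holds
lemma loop_eq (arr : List Int) : ∀ (m : Nat) (i : Int) (diffs : PySem.Set Int),
    m = (((arr.length : Int)) - i).toNat → DiffInv arr diffs i →
    validB_loop arr diffs (PySem.List.pyRange i (arr.length : Int) 1) =
      validA_outer arr (PySem.List.pyRange i (arr.length : Int) 1) := by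
  intro m
  induction m with
  | zero =>
    intro i diffs hm _
    rw [PySem.List.pyRange_one_eq_nil (by omega)]
    rfl
  | succ m ih =>
    intro i diffs hm hInv
    by_cases hlt : i < (arr.length : Int)
    · rw [PySem.List.pyRange_one_cons hlt]
      show (let x := PySem.List.pyGetD arr (i - 1) 0
            let diffs' := (PySem.List.pyRange 0 (i - 1) 1).foldl
                (fun s j => PySem.Set.add s |x - PySem.List.pyGetD arr j 0|) diffs
            if !(PySem.Set.contains diffs' (PySem.List.pyGetD arr i 0)) then false
            else validB_loop arr diffs' (PySem.List.pyRange (i + 1) (arr.length : Int) 1)) = _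
      set diffs' := (PySem.List.pyRange 0 (i - 1) 1).foldl
          (fun s j => PySem.Set.add s |PySem.List.pyGetD arr (i - 1) 0 - PySem.List.pyGetD arr j 0|) diffs with hd
      have hInv' : DiffInv arr diffs' (i + 1) := inv_step arr diffs i hInv
      have hcontains : PySem.Set.contains diffs' (PySem.List.pyGetD arr i 0) = validA_check arr i := by
        have h1 := PySem.Set.contains_iff (s := diffs') (x := PySem.List.pyGetD arr i 0)
        have h2 := check_iff arr i
        have h3 := hInv' (PySem.List.pyGetD arr i 0)
        have : PySem.Set.contains diffs' (PySem.List.pyGetD arr i 0) = true ↔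
            validA_check arr i = true := by
          rw [h1, h3, h2]
          constructor
          · rintro ⟨p, q, h0, hpq, hqi, h⟩; exact ⟨p, q, h0, hpq, by omega, h⟩
          · rintro ⟨p, q, h0, hpq, hqi, h⟩; exact ⟨p, q, h0, hpq, by omega, h⟩
        cases hb : PySem.Set.contains diffs' (PySem.List.pyGetD arr i 0) <;>
          cases hc : validA_check arr i <;> simp_all
        obtain ⟨p, hp0, q, hpq, hqi, h⟩ := hb
        exact h2 p hp0 q hpq hqi h
      show (if !(PySem.Set.contains diffs' (PySem.List.pyGetD arr i 0)) then false
            else validB_loop arr diffs' (PySem.List.pyRange (i + 1) (arr.length : Int) 1)) = _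
      rw [hcontains]
      show _ = (if !(validA_check arr i) then false
                else validA_outer arr (PySem.List.pyRange (i + 1) (arr.length : Int) 1))
      cases hc : validA_check arr i with
      | false => simp
      | true =>
        simp only [Bool.not_true, Bool.false_eq_true, if_false]
        exact ih (i + 1) diffs' (by omega) hInv'
    · rw [PySem.List.pyRange_one_eq_nil (by omega)]
      rfl

-- ===== VERDICT (by name: the statement is the Claim_ definition above) =====
theorem valid_array_spec : Claim_equal_valid_array := by
  intro arr _
  unfold Spec_valid_array valid_array valid_array_alt
  have h := loop_eq arr (((arr.length : Int)) - 2).toNat 2 PySem.Set.empty rfl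
    (by intro v; simp [PySem.Set.empty]; intro p q h0 hpq hq; omega)
  simp only [PySem.List.len_eq] at *
  exact h.symm
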